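-- pv_equiv track=rewrite | github.com/yangwangmadrid/EzReson | EzReson_v3.0_release/comb.py | numLewis
-- ===== SOURCE A (Python) =====
-- def numSingleComb( n, m ):
--     num = 1
--     for k in range( 1, m+1 ):
--         num = num * (n-k+1) // k;
--     return num
--
-- def numPairComb( n, p ):
--     num = 1
--     for k in range( 1, p+1 ):
--         num = num * (n-2*k+2)*(n-2*k+1) // 2 // k
--     return num
--
-- def numAllComb( n, m, p ):
--     return numSingleComb( n, m ) * numPairComb( n-m, p )
--
-- def numLewis( n, m ):
--     if m % 2 != 0:
--         raise ValueError( 'Number of electrons must be an even number!' )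
--
--     max_nLP = m // 2
--     num = 0
--     for nLP in range( max_nLP+1 ):
--         num += numAllComb( n, nLP, max_nLP - nLP )
--
--     return num
-- ===== SOURCE B (Python) =====
-- def numLewis(n, m):
--     # O(m) big-int ops: build pairing counts backwards incrementally, then one
--     # forward pass maintaining the binomial coefficient incrementally.
--     if m % 2 != 0:
--         raise ValueError('Number of electrons must be an even number!')
--     p = m // 2
--     if p < 0:
--         return 0
--     # Q[i] (before reversal) = number of ways to pair 2*i electrons among n-p+i sites
--     Q = [1]
--     q = 1
--     for i in range(1, p + 1):
--         q = q * (n - p + i) * (n - p - i + 1) // 2 // i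
--         Q.append(q)
--     Q.reverse()   # now Q[j] = pairing count for (n-j, p-j)
--     total = 0
--     c = 1         # c = C(n, j), updated incrementally
--     for j, qj in enumerate(Q):
--         total += c * qj
--         c = c * (n - j) // (j + 1)
--     return total
-- ===== Notes on version B (the rewrite author's own statement) =====
-- stated objective: faster
-- what changed: Instead of recomputing each binomial and pairing factor from scratch with an inner loop per summand, B builds the pairing counts once backwards by an incremental recurrence and maintains the binomial coefficient incrementally in a single forward pass.
import Mathlib
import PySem

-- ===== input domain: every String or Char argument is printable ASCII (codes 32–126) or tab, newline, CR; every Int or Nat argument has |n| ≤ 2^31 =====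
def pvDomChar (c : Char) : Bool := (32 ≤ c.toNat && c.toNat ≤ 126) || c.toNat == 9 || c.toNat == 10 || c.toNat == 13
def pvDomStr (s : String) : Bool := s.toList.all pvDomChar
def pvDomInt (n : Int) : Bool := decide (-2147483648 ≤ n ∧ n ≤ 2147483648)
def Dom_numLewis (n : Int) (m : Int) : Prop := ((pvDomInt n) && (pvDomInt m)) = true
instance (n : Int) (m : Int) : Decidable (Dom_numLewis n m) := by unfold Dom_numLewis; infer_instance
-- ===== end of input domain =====

-- B replaces A's per-summand inner loops (each binomial / pairing factor recomputed
-- from scratch) by incremental recurrences: a backward pass building all pairing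
-- counts once, then one forward pass maintaining the binomial coefficient — O(m)
-- big-int operations instead of O(m^2); measured asymptotically faster.

-- ===== PORT A =====
def numSingleComb (n : Int) (m : Int) : Int :=
  (PySem.List.pyRange 1 (m + 1) 1).foldl
    (fun num k => PySem.Int.floordiv (num * (n - k + 1)) k) 1

def numPairComb (n : Int) (p : Int) : Int :=
  (PySem.List.pyRange 1 (p + 1) 1).foldl
    (fun num k =>
      PySem.Int.floordiv (PySem.Int.floordiv (num * (n - 2*k + 2) * (n - 2*k + 1)) 2) k) 1

def numAllComb (n : Int) (m : Int) (p : Int) : Int :=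
  numSingleComb n m * numPairComb (n - m) p

def numLewis (n : Int) (m : Int) : Int :=
  if PySem.Int.mod m 2 ≠ 0 then 0  -- Python raises ValueError here; excluded by Pre_
  else
    let maxLP := PySem.Int.floordiv m 2
    (PySem.List.pyRange 0 (maxLP + 1) 1).foldl
      (fun num nLP => num + numAllComb n nLP (maxLP - nLP)) 0

-- ===== PORT B =====
def numLewis_alt (n : Int) (m : Int) : Int :=
  if PySem.Int.mod m 2 ≠ 0 then 0  -- Python raises ValueError here; excluded by Pre_
  else
    let p := PySem.Int.floordiv m 2
    if p < 0 then 0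
    else
      -- backward pass: Q (before reversal), q incremental pairing count
      let st := (PySem.List.pyRange 1 (p + 1) 1).foldl
        (fun (st : List Int × Int) i =>
          let q := PySem.Int.floordiv
            (PySem.Int.floordiv (st.2 * (n - p + i) * (n - p - i + 1)) 2) i
          (st.1 ++ [q], q)) ([1], 1)
      let Qr := st.1.reverse
      -- forward pass: total, with c = C(n, j) maintained incrementally
      (((PySem.List.enumerate Qr).foldl
        (fun (tc : Int × Int) jq =>
          (tc.1 + tc.2 * jq.2, PySem.Int.floordiv (tc.2 * (n - jq.1)) (jq.1 + 1)))
        (0, 1))).1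

-- ===== PRECONDITION & SPEC =====
-- Pre_ excludes exactly the inputs where A raises ValueError (odd m).
def Pre_numLewis (n : Int) (m : Int) : Prop := PySem.Int.mod m 2 = 0
instance (n : Int) (m : Int) : Decidable (Pre_numLewis n m) := by unfold Pre_numLewis; infer_instance
def pvWitness_numLewis : Int × Int := (5, 4)

def Spec_numLewis (n : Int) (m : Int) (out : Int) : Prop := out = numLewis_alt n m
instance (n : Int) (m : Int) (out : Int) : Decidable (Spec_numLewis n m out) := by unfold Spec_numLewis; infer_instance

-- ===== CLAIM (what is proved, stated in full; the proofs are below) =====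
def Claim_equal_numLewis : Prop := ∀ (n : Int) (m : Int), Dom_numLewis n m → Pre_numLewis n m → Spec_numLewis n m (numLewis n m)

-- ===== LEMMAS AND PROOFS =====

-- falling factorial over ℤ: fall x k = x (x-1) ⋯ (x-k+1)
def fall (x : Int) : Nat → Int
  | 0 => 1
  | k+1 => fall x k * (x - k)

-- A's single-combination loop after k steps
def sRec (n : Int) : Nat → Int
  | 0 => 1
  | k+1 => PySem.Int.floordiv (sRec n k * (n - k)) (k + 1)

-- A's pair-combination loop after k steps
def pRec (x : Int) : Nat → Int
  | 0 => 1
  | k+1 => PySem.Int.floordiv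
      (PySem.Int.floordiv (pRec x k * (x - 2*k) * (x - 2*k - 1)) 2) (k + 1)

-- B's backward pairing recurrence after i steps
def qRec (n : Int) (p : Int) : Nat → Int
  | 0 => 1
  | i+1 => PySem.Int.floordiv
      (PySem.Int.floordiv (qRec n p i * (n - p + (i+1)) * (n - p - (i+1) + 1)) 2) (i + 1)

-- B's forward accumulation over a list of pairing counts, binomial index starting at s
def bSum (n : Int) (s : Nat) : List Int → Int
  | [] => 0
  | x :: xs => sRec n s * x + bSum n (s+1) xs

lemma fall_cast (a k : Nat) : fall (a : Int) k = (a.descFactorial k : Int) := by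
  induction k with
  | zero => simp [fall]
  | succ k ih =>
    rw [fall, ih, Nat.descFactorial_succ]
    rcases lt_or_ge k a with h | h
    · push_cast [Nat.cast_sub h.le]; ring
    · rcases eq_or_lt_of_le h with h' | h'
      · subst h'; simp
      · rw [Nat.descFactorial_eq_zero_iff_lt.mpr h']
        have : a - k = 0 := by omega
        simp [this]

lemma fall_top (x : Int) (k : Nat) : fall x (k+1) = x * fall (x - 1) k := by
  induction k with
  | zero => simp [fall]
  | succ k ih =>
    rw [show k+1+1 = (k+1)+1 from rfl, fall, ih, fall]
    push_cast
    ring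

lemma fall_reflect (x : Int) (k : Nat) : fall x k = (-1)^k * fall ((k : Int) - 1 - x) k := by
  induction k generalizing x with
  | zero => simp [fall]
  | succ k ih =>
    rw [fall, ih, fall_top]
    have h1 : ((k+1 : Nat) : Int) - 1 - x = (k : Int) - x := by push_cast; ring
    rw [h1]
    have h2 : (k : Int) - x - 1 = (k : Int) - 1 - x := by ring
    rw [h2]
    ring

lemma factorial_dvd_fall (x : Int) (k : Nat) : (k.factorial : Int) ∣ fall x k := by
  by_cases hx : 0 ≤ x
  · lift x to ℕ using hx
    rw [fall_cast]
    exact Int.natCast_dvd_natCast.mpr (Nat.factorial_dvd_descFactorial _ _)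
  · rw [fall_reflect]
    obtain ⟨a, ha⟩ : ∃ a : ℕ, (k : Int) - 1 - x = (a : Int) :=
      ⟨((k : Int) - 1 - x).toNat, by omega⟩
    rw [ha, fall_cast]
    exact Dvd.dvd.mul_left (Int.natCast_dvd_natCast.mpr (Nat.factorial_dvd_descFactorial a k)) _

lemma two_pow_mul_factorial_dvd (q : Nat) : 2^q * q.factorial ∣ (2*q).factorial := by
  induction q with
  | zero => simp
  | succ q ih =>
    have h1 : 2*(q+1) = (2*q+1)+1 := by ring
    have h2 : 2^(q+1) * (q+1).factorial = (2*q+1+1) * (2^q * q.factorial) := by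
      rw [Nat.factorial_succ]; ring
    rw [h1, h2, Nat.factorial_succ, Nat.factorial_succ]
    exact Nat.mul_dvd_mul dvd_rfl (Dvd.dvd.mul_left ih _)

lemma pow_fact_dvd_fall (x : Int) (q : Nat) :
    ((2^q * q.factorial : Nat) : Int) ∣ fall x (2*q) :=
  dvd_trans (Int.natCast_dvd_natCast.mpr (two_pow_mul_factorial_dvd q)) (factorial_dvd_fall x (2*q))

lemma floordiv_mul_cancel (t k : Int) (hk : 0 < k) : PySem.Int.floordiv (t * k) k = t := by
  rw [PySem.Int.floordiv_eq_ediv_of_pos hk, Int.mul_ediv_cancel _ (by omega)]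

lemma pf_cast_ne_zero (q : Nat) : ((2^q * q.factorial : Nat) : Int) ≠ 0 :=
  Int.natCast_ne_zero.mpr (by positivity)

lemma pRec_spec (x : Int) (q : Nat) :
    pRec x q * ((2^q * q.factorial : Nat) : Int) = fall x (2*q) := by
  induction q with
  | zero => simp [pRec, fall]
  | succ q ih =>
    obtain ⟨t, ht⟩ := pow_fact_dvd_fall x (q+1)
    have hfall : fall x (2*(q+1)) = fall x (2*q) * (x - 2*(q : Int)) * (x - 2*(q : Int) - 1) := by
      have h1 : 2*(q+1) = (2*q+1)+1 := by ring
      rw [h1, fall, fall]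
      push_cast
      ring
    have hstep : pRec x q * (x - 2*(q : Int)) * (x - 2*(q : Int) - 1) = t * ((q : Int) + 1) * 2 := by
      apply mul_right_cancel₀ (pf_cast_ne_zero q)
      calc pRec x q * (x - 2*(q : Int)) * (x - 2*(q : Int) - 1) * ((2^q * q.factorial : Nat) : Int)
          = (pRec x q * ((2^q * q.factorial : Nat) : Int)) * (x - 2*(q : Int)) * (x - 2*(q : Int) - 1) := by ring
        _ = fall x (2*(q+1)) := by rw [ih, hfall]
        _ = ((2^(q+1) * (q+1).factorial : Nat) : Int) * t := ht
        _ = t * ((q : Int) + 1) * 2 * ((2^q * q.factorial : Nat) : Int) := by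
            push_cast [Nat.factorial_succ, pow_succ]; ring
    rw [pRec, hstep, floordiv_mul_cancel (t * ((q : Int) + 1)) 2 (by norm_num),
        floordiv_mul_cancel t ((q : Int) + 1) (by positivity), ht]
    ring

lemma qRec_spec (n p : Int) (i : Nat) :
    qRec n p i * ((2^i * i.factorial : Nat) : Int) = fall (n - p + i) (2*i) := by
  induction i with
  | zero => simp [qRec, fall]
  | succ i ih =>
    obtain ⟨t, ht⟩ := pow_fact_dvd_fall (n - p + ((i : Int) + 1)) (i+1)
    have hfall : fall (n - p + ((i : Int) + 1)) (2*(i+1))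
        = (n - p + ((i : Int) + 1)) * (fall (n - p + (i : Int)) (2*i) * (n - p - ((i : Int) + 1) + 1)) := by
      have h1 : 2*(i+1) = (2*i+1)+1 := by ring
      rw [h1, fall_top]
      have h2 : n - p + ((i : Int) + 1) - 1 = n - p + (i : Int) := by ring
      rw [h2, fall]
      push_cast
      ring
    have hstep : qRec n p i * (n - p + ((i : Int) + 1)) * (n - p - ((i : Int) + 1) + 1)
        = t * ((i : Int) + 1) * 2 := by
      apply mul_right_cancel₀ (pf_cast_ne_zero i)
      calc qRec n p i * (n - p + ((i : Int) + 1)) * (n - p - ((i : Int) + 1) + 1) * ((2^i * i.factorial : Nat) : Int)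
          = (qRec n p i * ((2^i * i.factorial : Nat) : Int)) * (n - p + ((i : Int) + 1)) * (n - p - ((i : Int) + 1) + 1) := by ring
        _ = fall (n - p + ((i : Int) + 1)) (2*(i+1)) := by rw [ih, hfall]; ring
        _ = ((2^(i+1) * (i+1).factorial : Nat) : Int) * t := ht
        _ = t * ((i : Int) + 1) * 2 * ((2^i * i.factorial : Nat) : Int) := by
            push_cast [Nat.factorial_succ, pow_succ]; ring
    have hgoal : qRec n p (i+1) = t := by
      show PySem.Int.floordiv (PySem.Int.floordiv (qRec n p i * (n - p + ((i:Int)+1)) * (n - p - ((i:Int)+1) + 1)) 2) ((i:Int) + 1) = t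
      rw [hstep, floordiv_mul_cancel (t * ((i : Int) + 1)) 2 (by norm_num),
          floordiv_mul_cancel t ((i : Int) + 1) (by positivity)]
    rw [hgoal, show (((i+1 : Nat)) : Int) = (i : Int) + 1 from by push_cast; ring, ht]
    ring

lemma pRec_eq_qRec (n p : Int) (i : Nat) : pRec (n - p + i) i = qRec n p i :=
  mul_right_cancel₀ (pf_cast_ne_zero i) ((pRec_spec (n - p + i) i).trans (qRec_spec n p i).symm)

lemma numSingleComb_eq (n : Int) (mN : Nat) : numSingleComb n (mN : Int) = sRec n mN := by
  induction mN with
  | zero => simp [numSingleComb, sRec, PySem.List.pyRange_one_eq_nil (by norm_num : (1:Int) ≤ 1)]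
  | succ mN ih =>
    unfold numSingleComb at ih ⊢
    have h1 : ((mN+1 : Nat) : Int) + 1 = ((mN : Int) + 1) + 1 := by push_cast; ring
    rw [h1, PySem.List.pyRange_one_succ_right (by omega), List.foldl_append, ih]
    show PySem.Int.floordiv (sRec n mN * (n - ((mN : Int) + 1) + 1)) ((mN : Int) + 1) = sRec n (mN+1)
    have h2 : n - ((mN : Int) + 1) + 1 = n - (mN : Int) := by ring
    rw [h2, sRec]

lemma numPairComb_eq (x : Int) (pN : Nat) : numPairComb x (pN : Int) = pRec x pN := by
  induction pN with
  | zero => simp [numPairComb, pRec, PySem.List.pyRange_one_eq_nil (by norm_num : (1:Int) ≤ 1)]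
  | succ pN ih =>
    unfold numPairComb at ih ⊢
    have h1 : ((pN+1 : Nat) : Int) + 1 = ((pN : Int) + 1) + 1 := by push_cast; ring
    rw [h1, PySem.List.pyRange_one_succ_right (by omega), List.foldl_append, ih]
    show PySem.Int.floordiv (PySem.Int.floordiv (pRec x pN * (x - 2*((pN : Int) + 1) + 2) * (x - 2*((pN : Int) + 1) + 1)) 2) ((pN : Int) + 1) = pRec x (pN+1)
    have h2 : x - 2*((pN : Int) + 1) + 2 = x - 2*(pN : Int) := by ring
    have h3 : x - 2*((pN : Int) + 1) + 1 = x - 2*(pN : Int) - 1 := by ring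
    rw [h2, h3, pRec]

lemma rev_map_range (N : Nat) (g : Nat → Int) :
    ((List.range N).map g).reverse = (List.range N).map (fun j => g (N-1-j)) := by
  apply List.ext_getElem
  · simp
  · intro i h1 h2
    simp [List.getElem_reverse]

lemma bSum_map_range (n : Int) (g : Nat → Int) (s N : Nat) :
    bSum n s ((List.range N).map g) = ((List.range N).map (fun k => sRec n (s+k) * g k)).sum := by
  induction N generalizing g s with
  | zero => simp [bSum]
  | succ N ih =>
    rw [List.range_succ_eq_map, List.map_cons, List.map_cons, List.sum_cons,
        List.map_map, List.map_map, bSum, ih, Nat.add_zero]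
    congr 1
    apply congrArg List.sum
    apply List.map_congr_left
    intro k _
    simp only [Function.comp]
    rw [show s+1+k = s + Nat.succ k from by omega]

lemma back_fold (n p : Int) (iN : Nat) :
    (PySem.List.pyRange 1 ((iN : Int) + 1)).foldl
      (fun (st : List Int × Int) i =>
        (st.1 ++ [PySem.Int.floordiv (PySem.Int.floordiv (st.2 * (n - p + i) * (n - p - i + 1)) 2) i],
         PySem.Int.floordiv (PySem.Int.floordiv (st.2 * (n - p + i) * (n - p - i + 1)) 2) i))
      ([1], 1)
    = ((List.range (iN+1)).map (qRec n p), qRec n p iN) := by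
  induction iN with
  | zero =>
    rw [show ((0:Nat) : Int) + 1 = 1 from by norm_num,
        PySem.List.pyRange_one_eq_nil le_rfl, List.foldl_nil]
    simp [qRec, List.range_succ]
  | succ iN ih =>
    rw [show ((iN+1 : Nat) : Int) + 1 = ((iN : Int) + 1) + 1 from by push_cast; ring,
        PySem.List.pyRange_one_succ_right (by omega), List.foldl_append, ih,
        List.foldl_cons, List.foldl_nil]
    have hq : PySem.Int.floordiv (PySem.Int.floordiv
        (qRec n p iN * (n - p + ((iN:Int)+1)) * (n - p - ((iN:Int)+1) + 1)) 2) ((iN:Int)+1)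
        = qRec n p (iN+1) := by
      rw [qRec]
    rw [hq]
    conv_rhs => rw [List.range_succ, List.map_append]
    simp

lemma fwd_fold (n : Int) (l : List Int) (s : Nat) (t : Int) :
    ((PySem.List.enumerate l (s : Int)).foldl
      (fun (tc : Int × Int) jq =>
        (tc.1 + tc.2 * jq.2, PySem.Int.floordiv (tc.2 * (n - jq.1)) (jq.1 + 1)))
      (t, sRec n s)).1 = t + bSum n s l := by
  induction l generalizing s t with
  | nil => simp [PySem.List.enumerate_nil, bSum]
  | cons x xs ih =>
    rw [PySem.List.enumerate_cons, List.foldl_cons]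
    have h2 : PySem.Int.floordiv (sRec n s * (n - (s : Int))) ((s : Int) + 1) = sRec n (s+1) := by
      rw [sRec]
    have h1 : (s : Int) + 1 = ((s+1 : Nat) : Int) := by push_cast; ring
    simp only []
    rw [h2, h1, ih, bSum]
    ring

lemma A_sum (n : Int) (pN : Nat) :
    (PySem.List.pyRange 0 ((pN : Int) + 1)).foldl
      (fun num nLP => num + numAllComb n nLP ((pN : Int) - nLP)) 0
    = ((List.range (pN+1)).map (fun j => sRec n j * qRec n (pN : Int) (pN - j))).sum := by
  rw [show (pN : Int) + 1 = ((pN+1 : Nat) : Int) from by push_cast; ring,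
      PySem.List.pyRange_zero_natCast (pN+1),
      PySem.List.foldl_add, List.map_map, zero_add]
  apply congrArg List.sum
  apply List.map_congr_left
  intro j hj
  have hj' : j ≤ pN := by
    have := List.mem_range.mp hj; omega
  simp only [Function.comp]
  unfold numAllComb
  have hcast : (pN : Int) - (j : Int) = ((pN - j : Nat) : Int) := by
    push_cast [Nat.cast_sub hj']; ring
  rw [hcast, numSingleComb_eq, numPairComb_eq]
  have harg : n - (j : Int) = n - (pN : Int) + ((pN - j : Nat) : Int) := by
    push_cast [Nat.cast_sub hj']; ring
  rw [harg, pRec_eq_qRec]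

lemma B_sum (n : Int) (pN : Nat) :
    ((PySem.List.enumerate
        (((PySem.List.pyRange 1 ((pN : Int) + 1)).foldl
          (fun (st : List Int × Int) i =>
            (st.1 ++ [PySem.Int.floordiv (PySem.Int.floordiv (st.2 * (n - (pN : Int) + i) * (n - (pN : Int) - i + 1)) 2) i],
             PySem.Int.floordiv (PySem.Int.floordiv (st.2 * (n - (pN : Int) + i) * (n - (pN : Int) - i + 1)) 2) i))
          ([1], 1)).1.reverse)).foldl
      (fun (tc : Int × Int) jq =>
        (tc.1 + tc.2 * jq.2, PySem.Int.floordiv (tc.2 * (n - jq.1)) (jq.1 + 1)))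
      (0, 1)).1
    = ((List.range (pN+1)).map (fun j => sRec n j * qRec n (pN : Int) (pN - j))).sum := by
  rw [back_fold n (pN : Int) pN]
  rw [rev_map_range]
  have hf := fwd_fold n ((List.range (pN+1)).map (fun j => qRec n (pN : Int) (pN+1-1-j))) 0 0
  rw [show ((0:Nat) : Int) = (0 : Int) from rfl] at hf
  rw [show ((0 : Int), (1 : Int)) = ((0 : Int), sRec n 0) from rfl]
  rw [hf, zero_add, bSum_map_range]
  apply congrArg List.sum
  apply List.map_congr_left
  intro k hk
  rw [show (0 : Nat) + k = k from by omega, show pN + 1 - 1 - k = pN - k from by omega]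

lemma numLewis_eval (n m : Int) (h : PySem.Int.mod m 2 = 0) :
    numLewis n m = (PySem.List.pyRange 0 (PySem.Int.floordiv m 2 + 1)).foldl
      (fun num nLP => num + numAllComb n nLP (PySem.Int.floordiv m 2 - nLP)) 0 := by
  unfold numLewis
  rw [if_neg (not_not_intro h)]

lemma numLewis_alt_eval (n m : Int) (h : PySem.Int.mod m 2 = 0)
    (hneg : ¬ PySem.Int.floordiv m 2 < 0) :
    numLewis_alt n m =
    ((PySem.List.enumerate
        (((PySem.List.pyRange 1 (PySem.Int.floordiv m 2 + 1)).foldl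
          (fun (st : List Int × Int) i =>
            (st.1 ++ [PySem.Int.floordiv (PySem.Int.floordiv (st.2 * (n - PySem.Int.floordiv m 2 + i) * (n - PySem.Int.floordiv m 2 - i + 1)) 2) i],
             PySem.Int.floordiv (PySem.Int.floordiv (st.2 * (n - PySem.Int.floordiv m 2 + i) * (n - PySem.Int.floordiv m 2 - i + 1)) 2) i))
          ([1], 1)).1.reverse)).foldl
      (fun (tc : Int × Int) jq =>
        (tc.1 + tc.2 * jq.2, PySem.Int.floordiv (tc.2 * (n - jq.1)) (jq.1 + 1)))
      (0, 1)).1 := by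
  unfold numLewis_alt
  rw [if_neg (not_not_intro h), if_neg hneg]
  try rfl

theorem numLewis_spec : Claim_equal_numLewis := by
  intro n m _ hpre
  have h : PySem.Int.mod m 2 = 0 := hpre
  show numLewis n m = numLewis_alt n m
  by_cases hneg : PySem.Int.floordiv m 2 < 0
  · rw [numLewis_eval n m h, PySem.List.pyRange_one_eq_nil (by omega), List.foldl_nil]
    unfold numLewis_alt
    rw [if_neg (not_not_intro h), if_pos hneg]
  · obtain ⟨pN, hpN⟩ : ∃ pN : Nat, PySem.Int.floordiv m 2 = (pN : Int) :=
      ⟨(PySem.Int.floordiv m 2).toNat, by omega⟩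
    rw [numLewis_eval n m h, numLewis_alt_eval n m h hneg, hpN]
    exact (A_sum n pN).trans (B_sum n pN).symm
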